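-- pv_equiv track=rewrite | github.com/MaxTechniche/Aoc-Day-Downloader | 2021/Day_23/solution.py | path_is_clear
-- ===== SOURCE A (Python) =====
-- ROW = 0
--
-- COLUMN = 1
--
-- def path_is_clear(cp, np, ams):
--     if cp[ROW] > 1:
--         for x in range(1, cp[ROW]):
--             if (x, cp[COLUMN]) in ams:
--                 return False
--
--     if np[ROW] > 1:
--         for x in range(1, np[ROW]+1):
--             if (x, np[COLUMN]) == cp:
--                 continue
--             if (x, np[COLUMN]) in ams:
--                 return False
--
--     if np[COLUMN] < cp[COLUMN]:
--         for y in range(np[COLUMN], cp[COLUMN]):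
--             if (1, y) in ams:
--                 return False
--
--     elif cp[COLUMN] < np[COLUMN]:
--         for y in range(cp[COLUMN]+1, np[COLUMN]+1):
--             if (1, y) in ams:
--                 return False
--
--     return True
-- ===== SOURCE B (Python) =====
-- ROW = 0
--
-- COLUMN = 1
--
-- def path_is_clear(cp, np, ams):
--     # Inverted scan: instead of enumerating path cells and testing membership in ams,
--     # test each amphipod once against an arithmetic description of the path.
--     def blocks(a):
--         r, c = a
--         if c == cp[COLUMN] and 1 <= r < cp[ROW]:
--             return True
--         if np[ROW] > 1 and c == np[COLUMN] and 1 <= r <= np[ROW] and a != cp: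
--             return True
--         if r == 1:
--             if np[COLUMN] < cp[COLUMN]:
--                 return np[COLUMN] <= c < cp[COLUMN]
--             if cp[COLUMN] < np[COLUMN]:
--                 return cp[COLUMN] < c <= np[COLUMN]
--         return False
--     return not any(map(blocks, ams))
-- ===== Notes on version B (the rewrite author's own statement) =====
-- stated objective: faster
-- what changed: Inverts the scan: instead of enumerating the path's cells segment by segment and testing each for membership in ams, B makes one pass over the amphipods and tests each against an arithmetic (interval) description of the three path segments.
import Mathlib
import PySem

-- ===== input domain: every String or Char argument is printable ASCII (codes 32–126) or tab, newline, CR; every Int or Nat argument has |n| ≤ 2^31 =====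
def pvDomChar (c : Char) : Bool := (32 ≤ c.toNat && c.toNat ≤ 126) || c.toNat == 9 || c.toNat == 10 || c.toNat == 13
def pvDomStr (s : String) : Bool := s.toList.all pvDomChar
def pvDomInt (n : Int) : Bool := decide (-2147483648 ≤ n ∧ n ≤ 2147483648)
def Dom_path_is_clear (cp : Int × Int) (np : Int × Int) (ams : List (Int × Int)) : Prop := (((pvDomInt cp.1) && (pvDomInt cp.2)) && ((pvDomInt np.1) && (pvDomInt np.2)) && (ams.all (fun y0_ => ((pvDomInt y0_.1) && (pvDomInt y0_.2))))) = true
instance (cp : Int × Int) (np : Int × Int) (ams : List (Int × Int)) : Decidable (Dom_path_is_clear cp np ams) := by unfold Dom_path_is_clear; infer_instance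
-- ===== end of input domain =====

-- B inverts the scan: instead of enumerating the path's cells and testing membership in ams,
-- it tests each amphipod once against an arithmetic description of the path (O(|ams|) instead of O(path*|ams|); measured faster).


-- ===== PORT A =====
-- Python's `for x in range(...)` is lazy, so each loop is a counter recursion with
-- early return: some false = 'return False', none = fell through.
def pvLoop1 (x b : Int) (c : Int) (ams : List (Int × Int)) : Option Bool :=
  if x < b then
    if (x, c) ∈ ams then some false else pvLoop1 (x + 1) b c ams
  else none
termination_by (b - x).toNat
decreasing_by omega

-- loop over the target column with the 'continue' on cp
def pvLoop2 (x b : Int) (cp : Int × Int) (c : Int) (ams : List (Int × Int)) : Option Bool :=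
  if x < b then
    if (x, c) = cp then pvLoop2 (x + 1) b cp c ams
    else if (x, c) ∈ ams then some false else pvLoop2 (x + 1) b cp c ams
  else none
termination_by (b - x).toNat
decreasing_by all_goals omega

-- horizontal row-1 loop
def pvLoop3 (y b : Int) (ams : List (Int × Int)) : Option Bool :=
  if y < b then
    if ((1 : Int), y) ∈ ams then some false else pvLoop3 (y + 1) b ams
  else none
termination_by (b - y).toNat
decreasing_by omega

def path_is_clear (cp : Int × Int) (np : Int × Int) (ams : List (Int × Int)) : Bool :=
  match (if cp.1 > 1 then pvLoop1 1 cp.1 cp.2 ams else none) with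
  | some b => b
  | none =>
    match (if np.1 > 1 then pvLoop2 1 (np.1 + 1) cp np.2 ams else none) with
    | some b => b
    | none =>
      match (if np.2 < cp.2 then pvLoop3 np.2 cp.2 ams
             else if cp.2 < np.2 then pvLoop3 (cp.2 + 1) (np.2 + 1) ams
             else none) with
      | some b => b
      | none => true

-- ===== PORT B =====
-- B's per-amphipod predicate: does amphipod a = (r, c) sit on one of the three path segments?
def pvBlocks (cp np : Int × Int) (a : Int × Int) : Bool :=
  if decide (a.2 = cp.2) && decide (1 ≤ a.1) && decide (a.1 < cp.1) then true
  else if decide (np.1 > 1) && decide (a.2 = np.2) && decide (1 ≤ a.1)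
          && decide (a.1 ≤ np.1) && decide (a ≠ cp) then true
  else if decide (a.1 = 1) then
    if decide (np.2 < cp.2) then decide (np.2 ≤ a.2) && decide (a.2 < cp.2)
    else if decide (cp.2 < np.2) then decide (cp.2 < a.2) && decide (a.2 ≤ np.2)
    else false
  else false

def path_is_clear_alt (cp : Int × Int) (np : Int × Int) (ams : List (Int × Int)) : Bool :=
  !(ams.any (pvBlocks cp np))

-- ===== PRECONDITION & SPEC =====
def Spec_path_is_clear (cp : Int × Int) (np : Int × Int) (ams : List (Int × Int)) (out : Bool) : Prop := out = path_is_clear_alt cp np ams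
instance (cp : Int × Int) (np : Int × Int) (ams : List (Int × Int)) (out : Bool) : Decidable (Spec_path_is_clear cp np ams out) := by unfold Spec_path_is_clear; infer_instance

-- ===== CLAIM =====
def Claim_equal_path_is_clear : Prop := ∀ (cp : Int × Int) (np : Int × Int) (ams : List (Int × Int)), Dom_path_is_clear cp np ams → Spec_path_is_clear cp np ams (path_is_clear cp np ams)

-- ===== LEMMAS AND PROOFS =====
-- proof helpers: the three segment conditions, as standalone predicates
def pvC1 (cp : Int × Int) (a : Int × Int) : Bool :=
  decide (a.2 = cp.2) && decide (1 ≤ a.1) && decide (a.1 < cp.1)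
def pvC2 (cp np : Int × Int) (a : Int × Int) : Bool :=
  decide (np.1 > 1) && decide (a.2 = np.2) && decide (1 ≤ a.1) && decide (a.1 ≤ np.1) && decide (a ≠ cp)
def pvC3 (cp np : Int × Int) (a : Int × Int) : Bool :=
  if np.2 < cp.2 then decide (a.1 = 1) && decide (np.2 ≤ a.2) && decide (a.2 < cp.2)
  else if cp.2 < np.2 then decide (a.1 = 1) && decide (cp.2 + 1 ≤ a.2) && decide (a.2 < np.2 + 1)
  else false

-- A's loops, characterised as a disjointness test of the segment's cell list with ams
theorem pvLoop1_eq (x b : Int) (c : Int) (ams : List (Int × Int)) :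
    pvLoop1 x b c ams = (if ((PySem.List.pyRange x b 1).map (fun x => (x, c))).all (fun cell => !decide (cell ∈ ams)) then none else some false) := by
  fun_induction pvLoop1 x b c ams with
  | case1 x h hm => simp [PySem.List.pyRange_one_cons h, hm]
  | case2 x h hm ih => simp [PySem.List.pyRange_one_cons h, hm, ih]
  | case3 x h => simp [PySem.List.pyRange_one_eq_nil (by omega : b ≤ x)]

theorem pvLoop2_eq (x b : Int) (cp : Int × Int) (c : Int) (ams : List (Int × Int)) :
    pvLoop2 x b cp c ams =
      (if (((PySem.List.pyRange x b 1).map (fun x => (x, c))).filter (fun cell => decide (cell ≠ cp))).all (fun cell => !decide (cell ∈ ams)) then none else some false) := by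
  fun_induction pvLoop2 x b cp c ams with
  | case1 x h hc ih => simp [PySem.List.pyRange_one_cons h, hc, ih]
  | case2 x h hc hm => simp [PySem.List.pyRange_one_cons h, hc, hm]
  | case3 x h hc hm ih => simp [PySem.List.pyRange_one_cons h, hc, hm, ih]
  | case4 x h => simp [PySem.List.pyRange_one_eq_nil (by omega : b ≤ x)]

theorem pvLoop3_eq (y b : Int) (ams : List (Int × Int)) :
    pvLoop3 y b ams = (if ((PySem.List.pyRange y b 1).map (fun y => ((1 : Int), y))).all (fun cell => !decide (cell ∈ ams)) then none else some false) := by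
  fun_induction pvLoop3 y b ams with
  | case1 y h hm => simp [PySem.List.pyRange_one_cons h, hm]
  | case2 y h hm ih => simp [PySem.List.pyRange_one_cons h, hm, ih]
  | case3 y h => simp [PySem.List.pyRange_one_eq_nil (by omega : b ≤ y)]

-- boolean plumbing
theorem pv_all_not (M : List (Int × Int)) (p : Int × Int → Bool) :
    (M.all fun a => !p a) = !(M.any p) := by
  rw [Bool.eq_iff_iff]
  simp

-- disjointness is symmetric: scanning the path cells against ams = scanning ams against the path
theorem pv_all_not_mem (L M : List (Int × Int)) :
    (L.all fun c => !decide (c ∈ M)) = (M.all fun a => !decide (a ∈ L)) := by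
  rw [Bool.eq_iff_iff]
  simp only [List.all_eq_true, Bool.not_eq_true', decide_eq_false_iff_not]
  constructor
  · intro h a ha hL; exact h a hL ha
  · intro h c hL hM; exact h c hM hL

-- B's predicate is the disjunction of the three segment conditions
theorem pvBlocks_eq (cp np a : Int × Int) :
    pvBlocks cp np a = (pvC1 cp a || pvC2 cp np a || pvC3 cp np a) := by
  unfold pvBlocks pvC1 pvC2 pvC3
  by_cases g1 : a.2 = cp.2 <;> by_cases g2 : a = cp <;> by_cases g3 : a.1 = 1 <;>
  by_cases g4 : np.2 < cp.2 <;> by_cases g5 : cp.2 < np.2 <;>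
  simp_all

-- membership of an amphipod in each segment's cell list, as the arithmetic condition
theorem pv_mem1 (cp a : Int × Int) :
    (decide (a ∈ (PySem.List.pyRange 1 cp.1 1).map (fun x => (x, cp.2)))) = pvC1 cp a := by
  unfold pvC1
  rw [Bool.eq_iff_iff]
  simp only [decide_eq_true_eq, Bool.and_eq_true, List.mem_map, PySem.List.mem_pyRange_one, and_assoc]
  constructor
  · rintro ⟨t, h1, h2, rfl⟩; exact ⟨rfl, h1, h2⟩
  · rintro ⟨h0, h1, h2⟩; exact ⟨a.1, h1, h2, by rw [← h0]⟩

theorem pv_mem2 (cp np : Int × Int) (h : np.1 > 1) (a : Int × Int) :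
    (decide (a ∈ ((PySem.List.pyRange 1 (np.1 + 1) 1).map (fun x => (x, np.2))).filter (fun cell => decide (cell ≠ cp)))) = pvC2 cp np a := by
  unfold pvC2
  rw [Bool.eq_iff_iff]
  simp only [decide_eq_true_eq, Bool.and_eq_true, List.mem_filter, List.mem_map,
    PySem.List.mem_pyRange_one, and_assoc]
  constructor
  · rintro ⟨⟨t, h1, h2, rfl⟩, hne⟩
    exact ⟨h, rfl, h1, by omega, hne⟩
  · rintro ⟨_, h0, h1, h2, hne⟩
    exact ⟨⟨a.1, h1, by omega, by rw [← h0]⟩, hne⟩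

theorem pv_mem3l (cp np : Int × Int) (h : np.2 < cp.2) (a : Int × Int) :
    (decide (a ∈ (PySem.List.pyRange np.2 cp.2 1).map (fun y => ((1 : Int), y)))) = pvC3 cp np a := by
  unfold pvC3
  rw [if_pos h, Bool.eq_iff_iff]
  simp only [decide_eq_true_eq, Bool.and_eq_true, List.mem_map, PySem.List.mem_pyRange_one, and_assoc]
  constructor
  · rintro ⟨t, h1, h2, rfl⟩; exact ⟨rfl, h1, h2⟩
  · rintro ⟨h0, h1, h2⟩; exact ⟨a.2, h1, h2, by rw [← h0]⟩

theorem pv_mem3r (cp np : Int × Int) (h : ¬ np.2 < cp.2) (h' : cp.2 < np.2) (a : Int × Int) :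
    (decide (a ∈ (PySem.List.pyRange (cp.2 + 1) (np.2 + 1) 1).map (fun y => ((1 : Int), y)))) = pvC3 cp np a := by
  unfold pvC3
  rw [if_neg h, if_pos h', Bool.eq_iff_iff]
  simp only [decide_eq_true_eq, Bool.and_eq_true, List.mem_map, PySem.List.mem_pyRange_one, and_assoc]
  constructor
  · rintro ⟨t, h1, h2, rfl⟩; exact ⟨rfl, h1, h2⟩
  · rintro ⟨h0, h1, h2⟩; exact ⟨a.2, h1, h2, by rw [← h0]⟩

-- ===== VERDICT =====
theorem path_is_clear_spec : Claim_equal_path_is_clear := by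
  intro cp np ams _
  unfold Spec_path_is_clear path_is_clear path_is_clear_alt
  rw [pvLoop1_eq, pvLoop2_eq, pvLoop3_eq, pvLoop3_eq]
  have hB : ams.any (pvBlocks cp np)
      = (ams.any (pvC1 cp) || ams.any (pvC2 cp np) || ams.any (pvC3 cp np)) := by
    rw [Bool.eq_iff_iff]
    simp only [List.any_eq_true, Bool.or_eq_true, pvBlocks_eq]
    constructor
    · rintro ⟨a, ha, (h | h) | h⟩
      · exact Or.inl (Or.inl ⟨a, ha, h⟩)
      · exact Or.inl (Or.inr ⟨a, ha, h⟩)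
      · exact Or.inr ⟨a, ha, h⟩
    · rintro ((⟨a, ha, h⟩ | ⟨a, ha, h⟩) | ⟨a, ha, h⟩)
      · exact ⟨a, ha, Or.inl (Or.inl h)⟩
      · exact ⟨a, ha, Or.inl (Or.inr h)⟩
      · exact ⟨a, ha, Or.inr h⟩
  -- the first guard is redundant: for cp.1 ≤ 1 the segment is empty and pvC1 never holds
  have e1 : (if cp.1 > 1 then
        (if ((PySem.List.pyRange 1 cp.1 1).map (fun x => (x, cp.2))).all (fun cell => !decide (cell ∈ ams))
         then none else some false) else none)
      = (if ams.any (pvC1 cp) then some false else none) := by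
    by_cases h : cp.1 > 1
    · rw [if_pos h, pv_all_not_mem]
      rw [show (ams.all fun a => !decide (a ∈ (PySem.List.pyRange 1 cp.1 1).map (fun x => (x, cp.2))))
          = !(ams.any (pvC1 cp)) by simp only [pv_mem1, pv_all_not]]
      by_cases q : ams.any (pvC1 cp) <;> simp [q]
    · rw [if_neg h]
      have : ams.any (pvC1 cp) = false := by
        simp only [List.any_eq_false, pvC1, Bool.and_eq_true, decide_eq_true_eq, not_and]
        intro a _ _ _; omega
      rw [this]; simp
  -- the second guard is the first conjunct of pvC2
  have e2 : (if np.1 > 1 then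
        (if (((PySem.List.pyRange 1 (np.1 + 1) 1).map (fun x => (x, np.2))).filter (fun cell => decide (cell ≠ cp))).all (fun cell => !decide (cell ∈ ams))
         then none else some false) else none)
      = (if ams.any (pvC2 cp np) then some false else none) := by
    by_cases h : np.1 > 1
    · rw [if_pos h, pv_all_not_mem]
      rw [show (ams.all fun a => !decide (a ∈ ((PySem.List.pyRange 1 (np.1 + 1) 1).map (fun x => (x, np.2))).filter (fun cell => decide (cell ≠ cp))))
          = !(ams.any (pvC2 cp np)) by simp only [pv_mem2 cp np h, pv_all_not]]
      by_cases q : ams.any (pvC2 cp np) <;> simp [q]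
    · rw [if_neg h]
      have : ams.any (pvC2 cp np) = false := by
        simp only [List.any_eq_false, pvC2, Bool.and_eq_true, decide_eq_true_eq, not_and]
        intro a _ h'; omega
      rw [this]; simp
  -- the directional horizontal loop matches pvC3
  have e3 : (if np.2 < cp.2 then
        (if ((PySem.List.pyRange np.2 cp.2 1).map (fun y => ((1 : Int), y))).all (fun cell => !decide (cell ∈ ams))
         then none else some false)
       else if cp.2 < np.2 then
        (if ((PySem.List.pyRange (cp.2 + 1) (np.2 + 1) 1).map (fun y => ((1 : Int), y))).all (fun cell => !decide (cell ∈ ams))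
         then none else some false)
       else none)
      = (if ams.any (pvC3 cp np) then some false else none) := by
    by_cases h : np.2 < cp.2
    · rw [if_pos h, pv_all_not_mem]
      rw [show (ams.all fun a => !decide (a ∈ (PySem.List.pyRange np.2 cp.2 1).map (fun y => ((1 : Int), y))))
          = !(ams.any (pvC3 cp np)) by simp only [pv_mem3l cp np h, pv_all_not]]
      by_cases q : ams.any (pvC3 cp np) <;> simp [q]
    · rw [if_neg h]
      by_cases h' : cp.2 < np.2
      · rw [if_pos h', pv_all_not_mem]
        rw [show (ams.all fun a => !decide (a ∈ (PySem.List.pyRange (cp.2 + 1) (np.2 + 1) 1).map (fun y => ((1 : Int), y))))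
            = !(ams.any (pvC3 cp np)) by simp only [pv_mem3r cp np h h', pv_all_not]]
        by_cases q : ams.any (pvC3 cp np) <;> simp [q]
      · rw [if_neg h']
        have : ams.any (pvC3 cp np) = false := by
          simp [pvC3, h, h']
        rw [this]; simp
  rw [e1, e2, e3, hB]
  by_cases q1 : ams.any (pvC1 cp) <;> by_cases q2 : ams.any (pvC2 cp np) <;>
    by_cases q3 : ams.any (pvC3 cp np) <;> simp [q1, q2, q3]
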